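-- pv_equiv track=rewrite | github.com/Rxyalxrd/algorithms-and-data-structures | Sort_by_template.py | solution
-- ===== SOURCE A (Python) =====
-- def solution(count_num_in_list, list_of_num, len_res_list, template_list):
--     count_num = {}
--
--     for num in list_of_num:
--         if num in count_num:
--             count_num[num] += 1
--         else:
--             count_num[num] = 1
--
--     result = []
--
--     for num in template_list:
--         if num in count_num:
--             result.extend([num] * count_num[num])
--             del count_num[num]
--
--     remaining = sorted(
--         [num for num in count_num for _ in range(count_num[num])]
--     )
--     result.extend(remaining)
--
--     return result
-- ===== SOURCE B (Python) =====
-- def solution(count_num_in_list, list_of_num, len_res_list, template_list):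
--     rank = {}
--     for x in template_list:
--         rank.setdefault(x, len(rank))
--     n = len(rank)
--     return sorted(list_of_num, key=lambda x: (rank.get(x, n), x))
-- ===== Notes on version B (the rewrite author's own statement) =====
-- stated objective: idiomatic
-- what changed: A's three passes (build a count dict, extend-and-delete along the template, sort the leftovers) are replaced by one key-driven stable sort: rank maps each template value to its first-occurrence index and the whole list is sorted by the key (rank.get(x, len(rank)), x).
import Mathlib
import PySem

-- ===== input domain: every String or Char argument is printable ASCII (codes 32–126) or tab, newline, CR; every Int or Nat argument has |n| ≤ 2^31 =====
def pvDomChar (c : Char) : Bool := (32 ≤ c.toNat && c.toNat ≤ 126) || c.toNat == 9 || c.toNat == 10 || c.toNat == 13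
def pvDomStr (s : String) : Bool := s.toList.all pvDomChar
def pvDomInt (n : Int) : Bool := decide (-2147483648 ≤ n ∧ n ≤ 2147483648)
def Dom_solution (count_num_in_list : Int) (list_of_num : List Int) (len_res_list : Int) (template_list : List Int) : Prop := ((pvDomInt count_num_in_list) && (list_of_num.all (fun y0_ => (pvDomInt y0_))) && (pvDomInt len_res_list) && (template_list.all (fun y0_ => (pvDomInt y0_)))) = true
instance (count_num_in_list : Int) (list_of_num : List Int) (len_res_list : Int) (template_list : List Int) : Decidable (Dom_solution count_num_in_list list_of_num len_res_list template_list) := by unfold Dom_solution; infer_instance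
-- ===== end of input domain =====

-- B replaces A's three passes (count dict, template extend-and-delete, sort of the rest) by ONE
-- key-driven sort: rank = first-occurrence index of each template value, key x = (rank.get(x, n), x).
-- Objective: idiomatic; equivalence of the return value is proved below.

-- ===== PORT A =====
def solution (count_num_in_list : Int) (list_of_num : List Int) (len_res_list : Int) (template_list : List Int) : List Int :=
  let count_num := list_of_num.foldl
    (fun (d : PySem.Dict Int Int) num =>
      if d.contains num then d.modify num 0 (· + 1) else d.insert num 1)
    PySem.Dict.empty
  let rd := template_list.foldl
    (fun (p : List Int × PySem.Dict Int Int) num =>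
      if p.2.contains num then
        (p.1 ++ PySem.List.pyRepeat [num] (p.2.getD num 0), p.2.erase num)
      else p)
    ([], count_num)
  let remaining := PySem.List.sorted
    (rd.2.keys.flatMap (fun num => (PySem.List.pyRange 0 (rd.2.getD num 0) 1).map (fun _ => num)))
    (fun x => x) false
  rd.1 ++ remaining

-- ===== PORT B =====
def solution_alt (count_num_in_list : Int) (list_of_num : List Int) (len_res_list : Int) (template_list : List Int) : List Int :=
  let rank := template_list.foldl
    (fun (d : PySem.Dict Int Int) x => d.setdefault x (d.size : Int)) PySem.Dict.empty
  let n : Int := (rank.size : Int)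
  PySem.List.sorted2 list_of_num (fun x => rank.getD x n) (fun x => x) false

-- ===== PRECONDITION & SPEC =====
def Spec_solution (count_num_in_list : Int) (list_of_num : List Int) (len_res_list : Int) (template_list : List Int) (out : List Int) : Prop := out = solution_alt count_num_in_list list_of_num len_res_list template_list
instance (count_num_in_list : Int) (list_of_num : List Int) (len_res_list : Int) (template_list : List Int) (out : List Int) : Decidable (Spec_solution count_num_in_list list_of_num len_res_list template_list out) := by unfold Spec_solution; infer_instance

-- ===== CLAIM (what is proved, stated in full; the proofs are below) =====
def Claim_equal_solution : Prop := ∀ (count_num_in_list : Int) (list_of_num : List Int) (len_res_list : Int) (template_list : List Int), Dom_solution count_num_in_list list_of_num len_res_list template_list → Spec_solution count_num_in_list list_of_num len_res_list template_list (solution count_num_in_list list_of_num len_res_list template_list)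

-- ===== LEMMAS AND PROOFS =====

-- B's sort key, as a function of the template list
def rkey (t : List Int) : Int → Int := fun x =>
  let rank := t.foldl (fun (d : PySem.Dict Int Int) x => d.setdefault x (d.size : Int)) PySem.Dict.empty
  rank.getD x (rank.size : Int)

-- the order B sorts by: lexicographic on (rkey, id)
def PRel (k : Int → Int) (a b : Int) : Prop := k a < k b ∨ (k a = k b ∧ a ≤ b)

-- the Boolean strict comparison sorted2 uses
def ltB (k : Int → Int) (a b : Int) : Bool :=
  decide (k a < k b) || (!decide (k b < k a) && decide (a < b))

-- first-occurrence dedup of t relative to a seen list s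
def dd : List Int → List Int → List Int
  | [], _ => []
  | x :: t, s => if x ∈ s then dd t s else x :: dd t (s ++ [x])

-- first-occurrence dedup together with running indices starting at i
def ddI : List Int → List Int → Int → List (Int × Int)
  | [], _, _ => []
  | x :: t, s, i => if x ∈ s then ddI t s i else (x, i) :: ddI t (s ++ [x]) (i + 1)

-- the list A's template pass appends to result
def tfL : List Int → PySem.Dict Int Int → List Int
  | [], _ => []
  | x :: t, d => if d.contains x then List.replicate ((d.getD x 0).toNat) x ++ tfL t (d.erase x) else tfL t d

-- the dict A's template pass leaves behind
def te : List Int → PySem.Dict Int Int → PySem.Dict Int Int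
  | [], d => d
  | x :: t, d => if d.contains x then te t (d.erase x) else te t d

lemma ltB_false_iff (k : Int → Int) (a b : Int) : ltB k b a = false ↔ PRel k a b := by
  unfold ltB PRel
  simp only [Bool.or_eq_false_iff, Bool.and_eq_false_iff, decide_eq_false_iff_not,
    Bool.not_eq_false', decide_eq_true_eq, not_lt]
  constructor
  · rintro ⟨h1, h2 | h2⟩ <;> omega
  · intro h
    rcases h with h | ⟨h1, h2⟩ <;> constructor <;> omega

lemma ltB_true_asymm (k : Int → Int) {a b : Int} (h : ltB k a b = true) : ltB k b a = false := by
  unfold ltB at *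
  simp only [Bool.or_eq_true, Bool.and_eq_true, Bool.or_eq_false_iff, Bool.and_eq_false_iff,
    decide_eq_true_eq, Bool.not_eq_true', decide_eq_false_iff_not, Bool.not_eq_false',
    not_lt] at *
  rcases h with h | ⟨h1, h2⟩ <;> constructor <;> omega

lemma Rel_antisymm (k : Int → Int) {a b : Int} (h1 : PRel k a b) (h2 : PRel k b a) : a = b := by
  unfold PRel at *
  omega

lemma insertBy_pairwise (k : Int → Int) (x : Int) (acc : List Int)
    (h : acc.Pairwise (PRel k)) : (PySem.List.insertBy (ltB k) x acc).Pairwise (PRel k) := by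
  induction acc with
  | nil =>
    simp [PySem.List.insertBy]
  | cons y ys ih =>
    rw [PySem.List.insertBy]
    rcases h with _ | ⟨hy, hys⟩
    rcases hp : ltB k x y with hf | ht
    · simp only [Bool.false_eq_true, if_false]
      refine List.Pairwise.cons ?_ (ih hys)
      intro z hz
      rcases (PySem.List.mem_insertBy (ltB k) x z ys).1 hz with rfl | hz
      · exact (ltB_false_iff k y z).1 hp
      · exact hy z hz
    · simp only [if_true]
      refine List.Pairwise.cons ?_ (List.Pairwise.cons hy hys)
      intro z hz
      rcases List.mem_cons.1 hz with rfl | hz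
      · exact (ltB_false_iff k x z).1 (ltB_true_asymm k hp)
      · have hxy : PRel k x y := (ltB_false_iff k x y).1 (ltB_true_asymm k hp)
        have hyz : PRel k y z := hy z hz
        unfold PRel at *
        omega

lemma foldl_insertBy_pairwise (k : Int → Int) (xs acc : List Int)
    (h : acc.Pairwise (PRel k)) :
    (xs.foldl (fun a x => PySem.List.insertBy (ltB k) x a) acc).Pairwise (PRel k) := by
  induction xs generalizing acc with
  | nil => exact h
  | cons x xs ih =>
    exact ih _ (insertBy_pairwise k x acc h)

lemma sorted2_eq_foldl (xs : List Int) (k : Int → Int) :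
    PySem.List.sorted2 xs k (fun x => x) false
      = xs.foldl (fun a x => PySem.List.insertBy (ltB k) x a) [] := by
  unfold PySem.List.sorted2 ltB
  simp

lemma sorted2_pairwise (xs : List Int) (k : Int → Int) :
    (PySem.List.sorted2 xs k (fun x => x) false).Pairwise (PRel k) := by
  rw [sorted2_eq_foldl]
  exact foldl_insertBy_pairwise k xs [] List.Pairwise.nil

-- uniqueness: any PRel-pairwise permutation of xs IS sorted2 xs
lemma sorted2_eq_of_perm_of_pairwise (xs O : List Int) (k : Int → Int)
    (hp : O.Perm xs) (hs : O.Pairwise (PRel k)) :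
    PySem.List.sorted2 xs k (fun x => x) false = O := by
  have h1 : (PySem.List.sorted2 xs k (fun x => x) false).Perm xs :=
    PySem.List.sorted2_perm xs k (fun x => x) false
  have h2 := sorted2_pairwise xs k
  refine List.eq_of_perm_of_sorted ?_ h2 hs (h1.trans hp.symm)
  intro a b _ _ hab hba
  exact Rel_antisymm k hab hba

-- ---- dict basics ----
lemma dict_eta (d : PySem.Dict Int Int) : PySem.Dict.mk d.items = d := rfl


lemma get?_mk_filter (L : List (Int × Int)) (c x : Int) :
    (PySem.Dict.mk (L.filter (fun p => !(p.1 == c)))).get? x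
      = if x = c then none else (PySem.Dict.mk L).get? x := by
  induction L with
  | nil => simp [PySem.Dict.get?]
  | cons p L ih =>
    obtain ⟨a, v⟩ := p
    by_cases hac : a = c
    · subst hac
      simp only [List.filter_cons, beq_self_eq_true, Bool.not_true, Bool.false_eq_true, if_false,
        ih, PySem.Dict.get?_mk_cons]
      by_cases h1 : x = a
      · subst h1; simp
      · have hne : (a == x) = false := by simp; omega
        simp [h1, hne]
    · have hb : (!(a == c)) = true := by simp [hac]
      simp only [List.filter_cons, hb, if_true, PySem.Dict.get?_mk_cons, ih]
      by_cases hax : (a == x) = true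
      · have hxc : ¬ x = c := by simp at hax; omega
        simp [hax, hxc]
      · simp only [hax, Bool.false_eq_true, if_false]

lemma map_fst_filter (L : List (Int × Int)) (c : Int) :
    (L.filter (fun p => !(p.1 == c))).map (·.1) = (L.map (·.1)).filter (fun a => !(a == c)) := by
  induction L with
  | nil => rfl
  | cons p L ih =>
    by_cases h : (!(p.1 == c)) = true <;>
      simp [List.filter_cons, h, ih]

lemma get?_erase (d : PySem.Dict Int Int) (c x : Int) :
    (d.erase c).get? x = if x = c then none else d.get? x := by
  have h1 : d.erase c = PySem.Dict.mk (d.items.filter (fun p => !(p.1 == c))) := rfl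
  rw [h1, get?_mk_filter, dict_eta]

lemma keys_erase (d : PySem.Dict Int Int) (c : Int) :
    (d.erase c).keys = d.keys.filter (fun a => !(a == c)) := by
  have h1 : (d.erase c).keys = (d.items.filter (fun p => !(p.1 == c))).map (·.1) := rfl
  rw [h1, map_fst_filter]
  rfl

lemma contains_erase (d : PySem.Dict Int Int) (c x : Int) :
    (d.erase c).contains x = if x = c then false else d.contains x := by
  rw [PySem.Dict.contains_eq_isSome_get?, PySem.Dict.contains_eq_isSome_get?, get?_erase]
  split_ifs <;> rfl

lemma getD_erase_of_ne (d : PySem.Dict Int Int) {c x : Int} (h : x ≠ c) (v : Int) :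
    (d.erase c).getD x v = d.getD x v := by
  rw [PySem.Dict.getD_eq_get?_getD, PySem.Dict.getD_eq_get?_getD, get?_erase, if_neg h]

-- ---- the counting loop is counter ----
lemma count_fold_eq_counter (l : List Int) :
    l.foldl (fun (d : PySem.Dict Int Int) num =>
        if d.contains num then d.modify num 0 (· + 1) else d.insert num 1) PySem.Dict.empty
      = PySem.Dict.counter l := by
  rw [PySem.Dict.counter_eq_foldl]
  congr 1
  funext d num
  by_cases h : d.contains num
  · simp [h]
  · have h0 : d.getD num 0 = 0 :=
      PySem.Dict.getD_of_not_contains d 0 (by simpa using h)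
    simp only [h, Bool.false_eq_true, if_false, PySem.Dict.modify, h0, zero_add]

lemma template_fold (t : List Int) : ∀ (res : List Int) (d : PySem.Dict Int Int),
    t.foldl (fun (p : List Int × PySem.Dict Int Int) num =>
        if p.2.contains num then
          (p.1 ++ PySem.List.pyRepeat [num] (p.2.getD num 0), p.2.erase num)
        else p) (res, d)
      = (res ++ tfL t d, te t d) := by
  induction t with
  | nil => intro res d; simp [tfL, te]
  | cons x t ih =>
    intro res d
    simp only [List.foldl_cons]
    by_cases h : d.contains x
    · simp only [h, if_true]
      rw [ih]
      simp [tfL, te, h, PySem.List.pyRepeat_singleton, List.append_assoc]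
    · simp only [h, Bool.false_eq_true, if_false, ih, tfL, te]

-- ---- dd / ddI ----
lemma mem_dd (t : List Int) : ∀ (s : List Int) (x : Int), x ∈ dd t s ↔ x ∈ t ∧ x ∉ s := by
  induction t with
  | nil => intro s x; simp [dd]
  | cons y t ih =>
    intro s x
    by_cases hy : y ∈ s
    · simp only [dd, if_pos hy, ih, List.mem_cons]
      constructor
      · rintro ⟨h1, h2⟩; exact ⟨Or.inr h1, h2⟩
      · rintro ⟨h1 | h1, h2⟩
        · subst h1; exact absurd hy h2
        · exact ⟨h1, h2⟩
    · simp only [dd, if_neg hy, List.mem_cons, ih]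
      constructor
      · rintro (rfl | ⟨h1, h2⟩)
        · exact ⟨Or.inl rfl, hy⟩
        · simp only [List.mem_append, List.mem_singleton] at h2
          push_neg at h2
          exact ⟨Or.inr h1, h2.1⟩
      · rintro ⟨h1 | h1, h2⟩
        · exact Or.inl h1
        · by_cases hxy : x = y
          · exact Or.inl hxy
          · refine Or.inr ⟨h1, ?_⟩
            simp only [List.mem_append, List.mem_singleton]
            push_neg
            exact ⟨h2, hxy⟩

lemma nodup_dd (t : List Int) : ∀ (s : List Int), (dd t s).Nodup := by
  induction t with
  | nil => intro s; simp [dd]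
  | cons y t ih =>
    intro s
    by_cases hy : y ∈ s
    · simp only [dd, if_pos hy]; exact ih s
    · simp only [dd, if_neg hy]
      refine List.Nodup.cons ?_ (ih (s ++ [y]))
      intro hmem
      have := (mem_dd t (s ++ [y]) y).1 hmem
      exact this.2 (List.mem_append.2 (Or.inr (List.mem_singleton.2 rfl)))

lemma fst_ddI (t : List Int) : ∀ (s : List Int) (i : Int), (ddI t s i).map (·.1) = dd t s := by
  induction t with
  | nil => intro s i; rfl
  | cons y t ih =>
    intro s i
    by_cases hy : y ∈ s
    · simp only [ddI, dd, if_pos hy, ih]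
    · simp only [ddI, dd, if_neg hy, List.map_cons, ih]

lemma ddI_bounds (t : List Int) : ∀ (s : List Int) (i : Int) (p : Int × Int), p ∈ ddI t s i →
    i ≤ p.2 ∧ p.2 < i + (ddI t s i).length := by
  induction t with
  | nil => intro s i p hp; simp [ddI] at hp
  | cons y t ih =>
    intro s i p hp
    by_cases hy : y ∈ s
    · simp only [ddI, if_pos hy] at hp ⊢
      exact ih s i p hp
    · simp only [ddI, if_neg hy, List.mem_cons, List.length_cons] at hp ⊢
      rcases hp with rfl | hp
      · simp
      · have := ih (s ++ [y]) (i + 1) p hp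
        omega

lemma ddI_pairwise (t : List Int) : ∀ (s : List Int) (i : Int),
    (ddI t s i).Pairwise (fun p q => p.2 < q.2) := by
  induction t with
  | nil => intro s i; simp [ddI]
  | cons y t ih =>
    intro s i
    by_cases hy : y ∈ s
    · simp only [ddI, if_pos hy]; exact ih s i
    · simp only [ddI, if_neg hy]
      refine List.Pairwise.cons ?_ (ih (s ++ [y]) (i + 1))
      intro q hq
      have := ddI_bounds t (s ++ [y]) (i + 1) q hq
      simp only
      omega

lemma flatMap_congr_mem {l : List Int} {f g : Int → List Int}
    (h : ∀ x ∈ l, f x = g x) : l.flatMap f = l.flatMap g := by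
  induction l with
  | nil => rfl
  | cons x l ih =>
    simp only [List.flatMap_cons, h x (List.mem_cons_self), ih (fun y hy => h y (List.mem_cons_of_mem x hy))]

lemma tfL_closed (t : List Int) : ∀ (d : PySem.Dict Int Int) (s : List Int),
    (∀ x ∈ s, d.contains x = false) →
    tfL t d = ((dd t s).filter (fun x => d.contains x)).flatMap
        (fun x => List.replicate ((d.getD x 0).toNat) x) := by
  induction t with
  | nil => intro d s _; rfl
  | cons x t ih =>
    intro d s h
    by_cases hx : d.contains x
    · have hxs : x ∉ s := fun hm => by simp [h x hm] at hx
      have hpre : ∀ y ∈ s ++ [x], (d.erase x).contains y = false := by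
        intro y hy
        rcases List.mem_append.1 hy with hy | hy
        · by_cases hyx : y = x
          · subst hyx; rw [contains_erase, if_pos rfl]
          · rw [contains_erase, if_neg hyx]; exact h y hy
        · simp only [List.mem_singleton] at hy; subst hy
          rw [contains_erase, if_pos rfl]
      have hne : ∀ y ∈ dd t (s ++ [x]), y ≠ x := by
        intro y hy
        have := (mem_dd t (s ++ [x]) y).1 hy
        intro hh; subst hh
        exact this.2 (List.mem_append.2 (Or.inr (List.mem_singleton.2 rfl)))
      have hcongr : ∀ y ∈ dd t (s ++ [x]), ((d.erase x).contains y) = (d.contains y) := by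
        intro y hy
        rw [contains_erase, if_neg (hne y hy)]
      simp only [tfL, hx, if_true, dd, if_neg hxs, List.filter_cons, List.flatMap_cons]
      rw [ih (d.erase x) (s ++ [x]) hpre, List.filter_congr hcongr]
      congr 1
      apply flatMap_congr_mem
      intro y hy
      have hyd : y ∈ dd t (s ++ [x]) := List.mem_of_mem_filter hy
      rw [getD_erase_of_ne d (hne y hyd) 0]
    · by_cases hxs : x ∈ s
      · simp only [tfL, hx, Bool.false_eq_true, if_false, dd, if_pos hxs]
        exact ih d s h
      · have hpre2 : ∀ y ∈ s ++ [x], d.contains y = false := by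
          intro y hy
          rcases List.mem_append.1 hy with hy | hy
          · exact h y hy
          · simp only [List.mem_singleton] at hy; subst hy; simpa using hx
        simp only [tfL, hx, Bool.false_eq_true, if_false, dd, if_neg hxs, List.filter_cons]
        rw [ih d (s ++ [x]) hpre2]

lemma te_get? (t : List Int) : ∀ (d : PySem.Dict Int Int) (x : Int),
    (te t d).get? x = if x ∈ t then none else d.get? x := by
  induction t with
  | nil =>
    intro d x
    simp [te]
  | cons y t ih =>
    intro d x
    by_cases hy : d.contains y
    · simp only [te, hy, if_true, ih, get?_erase, List.mem_cons]
      by_cases hxt : x ∈ t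
      · simp [hxt]
      · by_cases hxy : x = y
        · simp [hxy, hxt]
        · simp [hxy, hxt]
    · simp only [te, hy, Bool.false_eq_true, if_false, ih, List.mem_cons]
      by_cases hxt : x ∈ t
      · simp [hxt]
      · by_cases hxy : x = y
        · subst hxy
          simp only [hxt, or_false, if_neg hxt, if_pos rfl, true_or, if_true]
          exact ((PySem.Dict.get?_eq_none_iff_contains d x).2 (by simpa using hy)).symm ▸ rfl
        · simp [hxy, hxt]

lemma te_nodup_keys (t : List Int) : ∀ (d : PySem.Dict Int Int), d.keys.Nodup → (te t d).keys.Nodup := by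
  induction t with
  | nil => intro d h; exact h
  | cons y t ih =>
    intro d h
    by_cases hy : d.contains y
    · simp only [te, hy, if_true]
      refine ih _ ?_
      rw [keys_erase]
      exact h.filter _
    · simp only [te, hy, Bool.false_eq_true, if_false]
      exact ih d h

-- ---- rank ----
lemma rank_items (t : List Int) : ∀ (d : PySem.Dict Int Int),
    (t.foldl (fun (d : PySem.Dict Int Int) x => d.setdefault x (d.size : Int)) d).items
      = d.items ++ ddI t d.keys (d.size : Int) := by
  induction t with
  | nil => intro d; simp [ddI]
  | cons x t ih =>
    intro d
    simp only [List.foldl_cons]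
    by_cases hc : d.contains x
    · rw [PySem.Dict.setdefault_of_contains d _ hc, ih, ddI,
        if_pos ((PySem.Dict.contains_iff_mem_keys d x).1 hc)]
    · have hnm : x ∉ d.keys := fun hm => by
        simp [(PySem.Dict.contains_iff_mem_keys d x).2 hm] at hc
      rw [PySem.Dict.setdefault_of_not_contains d _ (by simpa using hc), ih]
      have hitems : (d.insert x (d.size : Int)).items = d.items ++ [(x, (d.size : Int))] :=
        PySem.Dict.items_insert_of_not_contains d (k := x) _ (by simpa using hc)
      have hkeys : (d.insert x (d.size : Int)).keys = d.keys ++ [x] := by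
        show ((d.insert x (d.size : Int)).items).map (·.1) = _
        rw [hitems, List.map_append]
        rfl
      have hsize : ((d.insert x (d.size : Int)).size : Int) = (d.size : Int) + 1 := by
        show (((d.insert x (d.size : Int)).items).length : Int) = _
        rw [hitems, List.length_append]
        simp [PySem.Dict.size]
      rw [hitems, hkeys, hsize, ddI, if_neg hnm, List.append_assoc]
      rfl

lemma rank_items_nil (t : List Int) :
    (t.foldl (fun (d : PySem.Dict Int Int) x => d.setdefault x (d.size : Int)) PySem.Dict.empty).items
      = ddI t [] 0 := by
  rw [rank_items t PySem.Dict.empty]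
  simp [PySem.Dict.empty, PySem.Dict.keys, PySem.Dict.size, PySem.Dict.items]

lemma rank_keys_nil (t : List Int) :
    (t.foldl (fun (d : PySem.Dict Int Int) x => d.setdefault x (d.size : Int)) PySem.Dict.empty).keys
      = dd t [] := by
  show ((t.foldl (fun (d : PySem.Dict Int Int) x => d.setdefault x (d.size : Int)) PySem.Dict.empty).items).map (·.1) = _
  rw [rank_items_nil, fst_ddI]

lemma rank_size_nil (t : List Int) :
    (t.foldl (fun (d : PySem.Dict Int Int) x => d.setdefault x (d.size : Int)) PySem.Dict.empty).size
      = (dd t []).length := by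
  show ((t.foldl (fun (d : PySem.Dict Int Int) x => d.setdefault x (d.size : Int)) PySem.Dict.empty).items).length = _
  have h1 : (ddI t [] 0).length = ((ddI t [] 0).map (·.1)).length := by simp
  rw [rank_items_nil, h1, fst_ddI]

lemma rkey_of_mem_ddI (t : List Int) {x v : Int} (h : (x, v) ∈ ddI t [] 0) :
    rkey t x = v := by
  unfold rkey
  have hnd : (t.foldl (fun (d : PySem.Dict Int Int) x => d.setdefault x (d.size : Int)) PySem.Dict.empty).keys.Nodup := by
    rw [rank_keys_nil]; exact nodup_dd t []
  have hget := PySem.Dict.get?_of_mem_items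
    (t.foldl (fun (d : PySem.Dict Int Int) x => d.setdefault x (d.size : Int)) PySem.Dict.empty)
    (k := x) (v := v) (by rw [rank_items_nil]; exact h) hnd
  exact PySem.Dict.getD_of_get?_eq_some _ _ hget

lemma rkey_of_not_mem (t : List Int) {x : Int} (h : x ∉ t) :
    rkey t x = ((dd t []).length : Int) := by
  unfold rkey
  have hnm : x ∉ (t.foldl (fun (d : PySem.Dict Int Int) x => d.setdefault x (d.size : Int)) PySem.Dict.empty).keys := by
    rw [rank_keys_nil]
    intro hm
    exact h ((mem_dd t [] x).1 hm).1
  have hget := (PySem.Dict.get?_eq_none_iff_not_mem_keys _ x).2 hnm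
  rw [PySem.Dict.getD_of_get?_eq_none _ _ hget, rank_size_nil]

lemma rkey_lt_of_mem (t : List Int) {x : Int} (h : x ∈ t) :
    rkey t x < ((dd t []).length : Int) := by
  have hmem : x ∈ dd t [] := (mem_dd t [] x).2 ⟨h, by simp⟩
  rw [← fst_ddI t [] 0] at hmem
  rcases List.mem_map.1 hmem with ⟨p, hp, hfst⟩
  have hxv : (x, p.2) ∈ ddI t [] 0 := by
    rw [← hfst]
    simpa using hp
  rw [rkey_of_mem_ddI t hxv]
  have hb := ddI_bounds t [] 0 p hp
  have hlen : ((ddI t [] 0).length) = (dd t []).length := by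
    rw [← fst_ddI t [] 0, List.length_map]
  simp only at hb
  omega

lemma dd_pairwise_rkey (t : List Int) :
    (dd t []).Pairwise (fun a b => rkey t a < rkey t b) := by
  rw [← fst_ddI t [] 0]
  rw [List.pairwise_map]
  refine (ddI_pairwise t [] 0).imp_of_mem ?_
  intro p q hp hq hlt
  have hp' : (p.1, p.2) ∈ ddI t [] 0 := by simpa using hp
  have hq' : (q.1, q.2) ∈ ddI t [] 0 := by simpa using hq
  rw [rkey_of_mem_ddI t hp', rkey_of_mem_ddI t hq']
  exact hlt

-- ---- flatMap of replicates ----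
lemma count_flatMap_replicate (m : Int → Nat) (x : Int) : ∀ (ks : List Int), ks.Nodup →
    (ks.flatMap (fun y => List.replicate (m y) y)).count x = if x ∈ ks then m x else 0 := by
  intro ks
  induction ks with
  | nil => simp
  | cons y ks ih =>
    intro hnd
    rcases List.nodup_cons.1 hnd with ⟨hy, hnd'⟩
    simp only [List.flatMap_cons, List.count_append, List.count_replicate, ih hnd',
      List.mem_cons]
    by_cases hxy : x = y
    · subst hxy
      have hxk : x ∉ ks := hy
      simp [hxk]
    · have : (y == x) = false := by simp; omega
      simp [this, hxy]

lemma pairwise_flatMap_replicate (k : Int → Int) (m : Int → Nat) : ∀ (ks : List Int),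
    ks.Pairwise (fun a b => k a < k b) →
    (ks.flatMap (fun y => List.replicate (m y) y)).Pairwise (PRel k) := by
  intro ks
  induction ks with
  | nil => intro _; simp
  | cons y ks ih =>
    intro hpw
    rcases hpw with _ | ⟨hy, hpw'⟩
    simp only [List.flatMap_cons]
    rw [List.pairwise_append]
    refine ⟨?_, ih hpw', ?_⟩
    · exact List.pairwise_replicate.2 (Or.inr (Or.inr ⟨rfl, le_refl y⟩))
    · intro a ha b hb
      have hay : a = y := List.eq_of_mem_replicate ha
      rcases List.mem_flatMap.1 hb with ⟨z, hz, hbz⟩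
      have hbz' : b = z := List.eq_of_mem_replicate hbz
      subst hay; subst hbz'
      exact Or.inl (hy _ hz)

-- ---- assembling A's output ----
lemma te_keys_mem (l t : List Int) (x : Int) :
    x ∈ (te t (PySem.Dict.counter l)).keys ↔ (x ∉ t ∧ x ∈ l) := by
  rw [← PySem.Dict.contains_iff_mem_keys, PySem.Dict.contains_eq_isSome_get?, te_get?]
  by_cases hxt : x ∈ t
  · simp [hxt]
  · simp only [hxt, if_false, not_false_iff, true_and]
    rw [← PySem.Dict.contains_eq_isSome_get?, PySem.Dict.contains_counter]
    simp

lemma te_getD (l t : List Int) (x : Int) (h : x ∉ t) :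
    (te t (PySem.Dict.counter l)).getD x 0 = (l.count x : Int) := by
  rw [PySem.Dict.getD_eq_get?_getD, te_get?, if_neg h, ← PySem.Dict.getD_eq_get?_getD,
    PySem.Dict.getD_counter]

lemma base_eq (l t : List Int) :
    (te t (PySem.Dict.counter l)).keys.flatMap
        (fun num => (PySem.List.pyRange 0 ((te t (PySem.Dict.counter l)).getD num 0) 1).map (fun _ => num))
      = (te t (PySem.Dict.counter l)).keys.flatMap
        (fun num => List.replicate (((te t (PySem.Dict.counter l)).getD num 0).toNat) num) := by
  apply flatMap_congr_mem
  intro y _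
  rw [List.map_const', PySem.List.length_pyRange_one]
  norm_num

lemma hA_closed (c n : Int) (l t : List Int) :
    solution c l n t
      = tfL t (PySem.Dict.counter l)
        ++ PySem.List.sorted
            ((te t (PySem.Dict.counter l)).keys.flatMap
              (fun num => (PySem.List.pyRange 0 ((te t (PySem.Dict.counter l)).getD num 0) 1).map (fun _ => num)))
            (fun x => x) false := by
  simp only [solution]
  rw [count_fold_eq_counter, template_fold]
  simp only [List.nil_append]

lemma O_perm (l t : List Int) :
    (tfL t (PySem.Dict.counter l)
      ++ PySem.List.sorted
          ((te t (PySem.Dict.counter l)).keys.flatMap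
            (fun num => (PySem.List.pyRange 0 ((te t (PySem.Dict.counter l)).getD num 0) 1).map (fun _ => num)))
          (fun x => x) false).Perm l := by
  rw [List.perm_iff_count]
  intro x
  rw [List.count_append]
  have hF : (tfL t (PySem.Dict.counter l)).count x
      = if x ∈ t ∧ x ∈ l then l.count x else 0 := by
    rw [tfL_closed t (PySem.Dict.counter l) [] (by simp)]
    rw [count_flatMap_replicate _ x _ ((nodup_dd t []).filter _)]
    by_cases hm : x ∈ (dd t []).filter (fun y => (PySem.Dict.counter l).contains y)
    · have hmem := List.mem_filter.1 hm
      have hx_t : x ∈ t := ((mem_dd t [] x).1 hmem.1).1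
      have hx_l : x ∈ l := by
        have := hmem.2
        rw [PySem.Dict.contains_counter] at this
        simpa using this
      rw [if_pos hm, if_pos ⟨hx_t, hx_l⟩, PySem.Dict.getD_counter]
      simp
    · rw [if_neg hm, if_neg]
      rintro ⟨hx_t, hx_l⟩
      exact hm (List.mem_filter.2 ⟨(mem_dd t [] x).2 ⟨hx_t, by simp⟩,
        by rw [PySem.Dict.contains_counter]; simpa using hx_l⟩)
  have hS : (PySem.List.sorted
        ((te t (PySem.Dict.counter l)).keys.flatMap
          (fun num => (PySem.List.pyRange 0 ((te t (PySem.Dict.counter l)).getD num 0) 1).map (fun _ => num)))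
        (fun x => x) false).count x
      = if x ∉ t ∧ x ∈ l then l.count x else 0 := by
    rw [(PySem.List.sorted_perm _ (fun x => x) false).count_eq, base_eq]
    rw [count_flatMap_replicate _ x _ (te_nodup_keys t _ (PySem.Dict.nodup_keys_counter l))]
    by_cases hm : x ∈ (te t (PySem.Dict.counter l)).keys
    · have hmem := (te_keys_mem l t x).1 hm
      rw [if_pos hm, if_pos hmem, te_getD l t x hmem.1]
      simp
    · rw [if_neg hm, if_neg]
      intro hmem
      exact hm ((te_keys_mem l t x).2 hmem)
  rw [hF, hS]
  by_cases hx_l : x ∈ l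
  · by_cases hx_t : x ∈ t
    · simp [hx_t, hx_l]
    · simp [hx_t, hx_l]
  · have : l.count x = 0 := List.count_eq_zero.2 hx_l
    simp [hx_l, this]

lemma O_pairwise (l t : List Int) :
    (tfL t (PySem.Dict.counter l)
      ++ PySem.List.sorted
          ((te t (PySem.Dict.counter l)).keys.flatMap
            (fun num => (PySem.List.pyRange 0 ((te t (PySem.Dict.counter l)).getD num 0) 1).map (fun _ => num)))
          (fun x => x) false).Pairwise (PRel (rkey t)) := by
  have hmemF : ∀ a ∈ tfL t (PySem.Dict.counter l), a ∈ t := by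
    intro a ha
    rw [tfL_closed t (PySem.Dict.counter l) [] (by simp)] at ha
    rcases List.mem_flatMap.1 ha with ⟨z, hz, haz⟩
    have : a = z := List.eq_of_mem_replicate haz
    subst this
    exact ((mem_dd t [] a).1 (List.mem_of_mem_filter hz)).1
  have hmemS : ∀ b ∈ PySem.List.sorted
        ((te t (PySem.Dict.counter l)).keys.flatMap
          (fun num => (PySem.List.pyRange 0 ((te t (PySem.Dict.counter l)).getD num 0) 1).map (fun _ => num)))
        (fun x => x) false, b ∉ t := by
    intro b hb
    rw [PySem.List.mem_sorted] at hb
    rw [base_eq] at hb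
    rcases List.mem_flatMap.1 hb with ⟨z, hz, hbz⟩
    have : b = z := List.eq_of_mem_replicate hbz
    subst this
    exact ((te_keys_mem l t b).1 hz).1
  rw [List.pairwise_append]
  refine ⟨?_, ?_, ?_⟩
  · rw [tfL_closed t (PySem.Dict.counter l) [] (by simp)]
    exact pairwise_flatMap_replicate (rkey t) _ _ ((dd_pairwise_rkey t).filter _)
  · have hpw := PySem.List.sorted_pairwise
      ((te t (PySem.Dict.counter l)).keys.flatMap
        (fun num => (PySem.List.pyRange 0 ((te t (PySem.Dict.counter l)).getD num 0) 1).map (fun _ => num)))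
      (fun x => x)
    refine hpw.imp_of_mem ?_
    intro a b ha hb hle
    right
    constructor
    · rw [rkey_of_not_mem t (hmemS a ha), rkey_of_not_mem t (hmemS b hb)]
    · exact hle
  · intro a ha b hb
    left
    have h1 : rkey t a < ((dd t []).length : Int) := rkey_lt_of_mem t (hmemF a ha)
    have h2 : rkey t b = ((dd t []).length : Int) := rkey_of_not_mem t (hmemS b hb)
    omega

-- ===== VERDICT (by name: the statement is the Claim_ definition above) =====
theorem solution_spec : Claim_equal_solution := by
  intro c l n t _
  unfold Spec_solution
  have hB : solution_alt c l n t = PySem.List.sorted2 l (rkey t) (fun x => x) false := rfl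
  rw [hB, hA_closed c n l t]
  exact (sorted2_eq_of_perm_of_pairwise l _ (rkey t) (O_perm l t) (O_pairwise l t)).symm
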